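-- pv_equiv track=rewrite | github.com/genropy/genro-bag | src/genro_bag/builders/validations.py | validate_sub_tags_order
-- ===== SOURCE A (Python) =====
-- def validate_sub_tags_order(tags: list[str], order_groups: list[set[str]]) -> bool:
--     """Check tags respect group ordering.
--
--     Tags in earlier groups must appear before tags in later groups.
--     Tags not in any group can appear anywhere.
--     """
--     current_group_idx = 0
--     for tag in tags:
--         # Find which group this tag belongs to
--         tag_group_idx = None
--         for i, group in enumerate(order_groups):
--             if tag in group:
--                 tag_group_idx = i
--                 break
--
--         if tag_group_idx is None:
--             continue  # Tag not in order spec, can be anywhere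
--
--         if tag_group_idx < current_group_idx:
--             return False  # Tag from earlier group after later group
--
--         current_group_idx = tag_group_idx
--
--     return True
-- ===== SOURCE B (Python) =====
-- def validate_sub_tags_order(tags: list[str], order_groups: list[set[str]]) -> bool:
--     """Check tags respect group ordering.
--
--     Build tag -> first group index (reverse iteration, earlier groups overwrite),
--     project tags to their index sequence, and accept iff that sequence is already
--     sorted (equals its sorted copy). No stateful scan or early return.
--     """
--     first_group = {}
--     for i, group in reversed(list(enumerate(order_groups))):
--         for tag in group:
--             first_group[tag] = i
--     idxs = [first_group[t] for t in tags if t in first_group]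
--     return idxs == sorted(idxs)
-- ===== Notes on version B (the rewrite author's own statement) =====
-- stated objective: alternative
-- what changed: Instead of A's stateful scan (per-tag inner group search, monotone current-index accumulator, early return), B builds a tag->first-group-index map by reverse overwriting, projects the tag list to its index sequence, and accepts iff that sequence equals its sorted copy.
import Mathlib
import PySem

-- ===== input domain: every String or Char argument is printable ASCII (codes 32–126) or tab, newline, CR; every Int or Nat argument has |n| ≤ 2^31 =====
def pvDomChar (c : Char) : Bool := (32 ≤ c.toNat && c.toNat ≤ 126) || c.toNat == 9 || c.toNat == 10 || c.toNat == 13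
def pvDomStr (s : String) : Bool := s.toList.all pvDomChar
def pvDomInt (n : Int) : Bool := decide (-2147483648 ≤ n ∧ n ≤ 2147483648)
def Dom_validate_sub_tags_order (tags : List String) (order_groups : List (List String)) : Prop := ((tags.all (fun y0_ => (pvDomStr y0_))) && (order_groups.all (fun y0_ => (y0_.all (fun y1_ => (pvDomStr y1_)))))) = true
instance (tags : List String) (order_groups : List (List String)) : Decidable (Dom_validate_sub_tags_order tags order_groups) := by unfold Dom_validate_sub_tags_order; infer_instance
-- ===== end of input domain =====

-- B replaces A's stateful scan (per-tag inner group search, monotone accumulator,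
-- early return) by: tag->first-group-index map built by reverse overwriting, project
-- tags to their index sequence, accept iff it equals its sorted copy (objective: alternative).

-- ===== PORT A =====
-- inner loop: 'for i, group in enumerate(order_groups): if tag in group: … break'
def vstoA_find (tag : String) : List (List String) → Int → Option Int
  | [], _ => none
  | g :: rest, i => if tag ∈ g then some i else vstoA_find tag rest (i + 1)

-- outer loop over tags carrying current_group_idx, 'return False' = false
def vstoA_loop (order_groups : List (List String)) : List String → Int → Bool
  | [], _ => true
  | tag :: rest, cur =>
    match vstoA_find tag order_groups 0 with
    | none => vstoA_loop order_groups rest cur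
    | some i => if i < cur then false else vstoA_loop order_groups rest i

def validate_sub_tags_order (tags : List String) (order_groups : List (List String)) : Bool :=
  vstoA_loop order_groups tags 0

-- ===== PORT B =====
-- 'for i, group in reversed(list(enumerate(order_groups))): for tag in group: first_group[tag] = i'
def vstoB_first (order_groups : List (List String)) : PySem.Dict String Int :=
  ((PySem.List.enumerate order_groups).reverse).foldl
    (fun d p => p.2.foldl (fun d t => d.insert t p.1) d) PySem.Dict.empty

-- 'idxs = [first_group[t] for t in tags if t in first_group]; return idxs == sorted(idxs)'
def validate_sub_tags_order_alt (tags : List String) (order_groups : List (List String)) : Bool :=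
  let first := vstoB_first order_groups
  let idxs := tags.filterMap (fun t => first.get? t)
  idxs == PySem.List.sorted idxs (fun x => x) false

-- ===== PRECONDITION & SPEC =====
def Spec_validate_sub_tags_order (tags : List String) (order_groups : List (List String)) (out : Bool) : Prop := out = validate_sub_tags_order_alt tags order_groups
instance (tags : List String) (order_groups : List (List String)) (out : Bool) : Decidable (Spec_validate_sub_tags_order tags order_groups out) := by unfold Spec_validate_sub_tags_order; infer_instance

-- ===== CLAIM (what is proved, stated in full; the proofs are below) =====
def Claim_equal_validate_sub_tags_order : Prop := ∀ (tags : List String) (order_groups : List (List String)), Dom_validate_sub_tags_order tags order_groups → Spec_validate_sub_tags_order tags order_groups (validate_sub_tags_order tags order_groups)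

-- ===== LEMMAS AND PROOFS =====

-- first (forward) match in a list of (index, group) pairs
def vstoFirstIn (t : String) : List (Int × List String) → Option Int
  | [] => none
  | p :: rest => if t ∈ p.2 then some p.1 else vstoFirstIn t rest

-- inserting every tag of one group at index i
theorem vsto_inner (g : List String) (i : Int) (d : PySem.Dict String Int) (t : String) :
    (g.foldl (fun d s => d.insert s i) d).get? t
      = if t ∈ g then some i else d.get? t := by
  induction g generalizing d with
  | nil => simp
  | cons s g' ih =>
      simp only [List.foldl_cons]
      rw [ih, PySem.Dict.get?_insert]
      by_cases h : t ∈ g' <;> by_cases h' : t = s <;> simp [h, h']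

-- appending one pair at the back: it is consulted last
theorem vstoFirstIn_append (t : String) (ps : List (Int × List String)) (p : Int × List String) :
    vstoFirstIn t (ps ++ [p])
      = match vstoFirstIn t ps with
        | some i => some i
        | none => if t ∈ p.2 then some p.1 else none := by
  induction ps with
  | nil => simp [vstoFirstIn]
  | cons q ps' ih =>
      simp only [List.cons_append, vstoFirstIn]
      by_cases h : t ∈ q.2 <;> simp [h, ih]

-- folding inserts over ps: the LAST binding wins = first match in ps.reverse
theorem vsto_foldl_get? (ps : List (Int × List String)) (d : PySem.Dict String Int) (t : String) :
    (ps.foldl (fun d p => p.2.foldl (fun d s => d.insert s p.1) d) d).get? t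
      = match vstoFirstIn t ps.reverse with
        | some i => some i
        | none => d.get? t := by
  induction ps generalizing d with
  | nil => simp [vstoFirstIn]
  | cons p ps' ih =>
      simp only [List.foldl_cons, List.reverse_cons]
      rw [ih, vstoFirstIn_append]
      cases h : vstoFirstIn t ps'.reverse with
      | some i => simp
      | none => rw [vsto_inner]; by_cases hm : t ∈ p.2 <;> simp [hm]

-- first match in enumerate = A's inner search
theorem vstoFirstIn_enumerate (t : String) (gs : List (List String)) (s : Int) :
    vstoFirstIn t (PySem.List.enumerate gs s) = vstoA_find t gs s := by
  induction gs generalizing s with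
  | nil => simp [vstoFirstIn, vstoA_find, PySem.List.enumerate_nil]
  | cons g rest ih =>
      rw [PySem.List.enumerate_cons]
      by_cases h : t ∈ g <;> simp [vstoFirstIn, vstoA_find, h, ih]

-- the built dict looks up A's first group index
theorem vstoB_first_get? (gs : List (List String)) (t : String) :
    (vstoB_first gs).get? t = vstoA_find t gs 0 := by
  unfold vstoB_first
  rw [vsto_foldl_get?, List.reverse_reverse, vstoFirstIn_enumerate]
  cases vstoA_find t gs 0 <;> simp

-- A's find yields indices ≥ the start
theorem vstoA_find_ge (t : String) (gs : List (List String)) (s i : Int)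
    (h : vstoA_find t gs s = some i) : s ≤ i := by
  induction gs generalizing s with
  | nil => simp [vstoA_find] at h
  | cons g rest ih =>
      simp only [vstoA_find] at h
      split at h
      · simp at h; omega
      · have := ih (s + 1) h; omega

-- A's loop on tags = the same loop on the projected index list
def vstoAux : List Int → Int → Bool
  | [], _ => true
  | i :: r, cur => if i < cur then false else vstoAux r i

theorem vstoA_loop_eq_aux (gs : List (List String)) (tags : List String) (cur : Int) :
    vstoA_loop gs tags cur = vstoAux (tags.filterMap (fun t => vstoA_find t gs 0)) cur := by
  induction tags generalizing cur with
  | nil => rfl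
  | cons t rest ih =>
      simp only [vstoA_loop, List.filterMap_cons]
      cases h : vstoA_find t gs 0 with
      | none => exact ih cur
      | some i => simp only [vstoAux]; by_cases hi : i < cur <;> simp [hi, ih]

-- the stateful scan accepts exactly the chains cur ≤ i₁ ≤ i₂ ≤ …
theorem vstoAux_iff (l : List Int) (cur : Int) :
    vstoAux l cur = true ↔ List.IsChain (· ≤ ·) (cur :: l) := by
  induction l generalizing cur with
  | nil => simp [vstoAux]
  | cons i r ih =>
      simp only [vstoAux, List.isChain_cons_cons, ← ih]
      by_cases hi : i < cur
      · rw [if_pos hi]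
        simp only [Bool.false_eq_true, false_iff]
        rintro ⟨h, -⟩; omega
      · rw [if_neg hi]
        have hle : cur ≤ i := by omega
        simp [hle]

-- a chain from 0 over nonnegative ints ↔ the list equals its sorted copy
theorem vsto_chain_iff_sorted (l : List Int) (h : ∀ x ∈ l, 0 ≤ x) :
    List.IsChain (· ≤ ·) (0 :: l) ↔ l = PySem.List.sorted l (fun x => x) false := by
  constructor
  · intro hc
    have hp : l.Pairwise (· ≤ ·) :=
      (List.isChain_iff_pairwise.mp hc).sublist (List.sublist_cons_self 0 l)
    exact (PySem.List.sorted_eq_self_of_pairwise l (fun x : Int => x) hp).symm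
  · intro he
    have hp : l.Pairwise (· ≤ ·) := by
      have := PySem.List.sorted_pairwise (xs := l) (key := fun x : Int => x)
      rw [← he] at this
      exact this
    cases l with
    | nil => exact List.isChain_singleton 0
    | cons a r =>
        exact List.IsChain.cons_cons (h a (by simp)) (List.isChain_iff_pairwise.mpr hp)

-- ===== VERDICT (by name: the statement is the Claim_ definition above) =====
theorem validate_sub_tags_order_spec : Claim_equal_validate_sub_tags_order := by
  intro tags order_groups _
  unfold Spec_validate_sub_tags_order validate_sub_tags_order
  show vstoA_loop order_groups tags 0
      = ((tags.filterMap (fun t => (vstoB_first order_groups).get? t))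
          == PySem.List.sorted (tags.filterMap (fun t => (vstoB_first order_groups).get? t)) (fun x => x) false)
  have hdict : (tags.filterMap (fun t => (vstoB_first order_groups).get? t))
      = tags.filterMap (fun t => vstoA_find t order_groups 0) := by
    simp [vstoB_first_get?]
  rw [hdict]
  set idxs := tags.filterMap (fun t => vstoA_find t order_groups 0) with hidxs
  have hnn : ∀ x ∈ idxs, (0:Int) ≤ x := by
    intro x hx
    rw [hidxs] at hx
    obtain ⟨t, _, hf⟩ := List.mem_filterMap.mp hx
    exact vstoA_find_ge t order_groups 0 x hf
  rw [vstoA_loop_eq_aux, Bool.eq_iff_iff, vstoAux_iff, beq_iff_eq]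
  exact vsto_chain_iff_sorted idxs hnn
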